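-- pv_equiv track=rewrite | github.com/AnkitaAwasthi17/Resume_Analyzer | prompting.py | parse_model_response
-- ===== SOURCE A (Python) =====
-- def parse_model_response(response):
--     data = {
--         "Name": "",
--         "Contact Details": "",
--         "University": "",
--         "Year of Study": "",
--         "Course": "",
--         "Discipline": "",
--         "CGPA/Percentage": "",
--         "Key Skills": "",
--         "Gen AI Experience Score": "",
--         "AI/ML Experience Score": "",
--         "Supporting Information": ""
--     }
--
--     lines = response.splitlines()
--     for line in lines:
--         # Match known fields and map them to the corresponding dictionary keys
--         if line.startswith("1. Name:"):
--             data["Name"] = line.split(":", 1)[1].strip()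
--         elif line.startswith("2. Contact Details:"):
--             data["Contact Details"] = line.split(":", 1)[1].strip()
--         elif line.startswith("3. University:"):
--             data["University"] = line.split(":", 1)[1].strip()
--         elif line.startswith("4. Year of Study:"):
--             data["Year of Study"] = line.split(":", 1)[1].strip()
--         elif line.startswith("5. Course:"):
--             data["Course"] = line.split(":", 1)[1].strip()
--         elif line.startswith("6. Discipline:"):
--             data["Discipline"] = line.split(":", 1)[1].strip()
--         elif line.startswith("7. CGPA/Percentage:"):
--             data["CGPA/Percentage"] = line.split(":", 1)[1].strip()
--         elif line.startswith("8. Key Skills:"):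
--             data["Key Skills"] = line.split(":", 1)[1].strip()
--         elif line.startswith("9. Gen AI Experience Score:"):
--             data["Gen AI Experience Score"] = line.split(":", 1)[1].strip()
--         elif line.startswith("10. AI/ML Experience Score:"):
--             data["AI/ML Experience Score"] = line.split(":", 1)[1].strip()
--         elif line.startswith("11. Supporting Information:"):
--             data["Supporting Information"] += line.split(":", 1)[1].strip()
--         elif line.startswith("-") or line.strip():  # Append extra info to Supporting Information
--             data["Supporting Information"] += f" {line.strip()}"
--     return data
-- ===== SOURCE B (Python) =====
-- _FIELDS = [
--     ("1. Name:", "Name"),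
--     ("2. Contact Details:", "Contact Details"),
--     ("3. University:", "University"),
--     ("4. Year of Study:", "Year of Study"),
--     ("5. Course:", "Course"),
--     ("6. Discipline:", "Discipline"),
--     ("7. CGPA/Percentage:", "CGPA/Percentage"),
--     ("8. Key Skills:", "Key Skills"),
--     ("9. Gen AI Experience Score:", "Gen AI Experience Score"),
--     ("10. AI/ML Experience Score:", "AI/ML Experience Score"),
-- ]
-- _SUP = "11. Supporting Information:"
--
--
-- def parse_model_response(response):
--     # Staged: each plain field is the LAST matching line (assignment overwrites),
--     # Supporting Information is a join over its matches and the fallback lines.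
--     lines = response.splitlines()
--     data = {}
--     for prefix, key in _FIELDS:
--         data[key] = next(
--             (l[len(prefix):].strip() for l in reversed(lines) if l.startswith(prefix)),
--             "",
--         )
--     pieces = []
--     for l in lines:
--         if l.startswith(_SUP):
--             pieces.append(l[len(_SUP):].strip())
--         elif not any(l.startswith(p) for p, _ in _FIELDS):
--             t = l.strip()
--             if t:
--                 pieces.append(" " + t)
--     data["Supporting Information"] = "".join(pieces)
--     return data
-- ===== Notes on version B (the rewrite author's own statement) =====
-- stated objective: alternative
-- what changed: Replaces A's single forward pass that mutates an 11-key dict through a 12-branch elif cascade with staged passes: each plain field is computed independently as the last matching line via a backward scan (next(... reversed(lines))), and Supporting Information is assembled separately as a join over the list of its contributing pieces.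
import Mathlib
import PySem

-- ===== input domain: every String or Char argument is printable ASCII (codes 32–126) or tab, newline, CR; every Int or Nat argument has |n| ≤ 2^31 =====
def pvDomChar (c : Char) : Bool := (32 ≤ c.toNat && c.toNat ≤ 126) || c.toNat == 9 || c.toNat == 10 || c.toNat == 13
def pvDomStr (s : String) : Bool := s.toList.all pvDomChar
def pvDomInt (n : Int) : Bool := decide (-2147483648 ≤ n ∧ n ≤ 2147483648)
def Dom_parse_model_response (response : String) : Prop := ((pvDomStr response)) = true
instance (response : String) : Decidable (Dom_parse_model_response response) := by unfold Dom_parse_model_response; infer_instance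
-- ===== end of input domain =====

-- B replaces A's single pass over a mutable dict with staged passes: each plain field is the
-- last matching line found by a backward scan, Supporting Information is a join over its
-- matching and the fallback lines (alternative decomposition); return values proved equal.

-- the eleven field prefixes of the Python source, shared by both ports

def pvP0 : List Char := "1. Name:".toList
def pvP1 : List Char := "2. Contact Details:".toList
def pvP2 : List Char := "3. University:".toList
def pvP3 : List Char := "4. Year of Study:".toList
def pvP4 : List Char := "5. Course:".toList
def pvP5 : List Char := "6. Discipline:".toList
def pvP6 : List Char := "7. CGPA/Percentage:".toList
def pvP7 : List Char := "8. Key Skills:".toList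
def pvP8 : List Char := "9. Gen AI Experience Score:".toList
def pvP9 : List Char := "10. AI/ML Experience Score:".toList
def pvSupPrefix : List Char := "11. Supporting Information:".toList

-- ===== PORT A =====
-- dict values are kept as List Char during the loop and turned into String at the very end
-- (Lean's String append is opaque to the kernel); keys are the literal Python keys.
def pvInitA : PySem.Dict String (List Char) := PySem.Dict.ofList
  [("Name", []), ("Contact Details", []), ("University", []), ("Year of Study", []),
   ("Course", []), ("Discipline", []), ("CGPA/Percentage", []), ("Key Skills", []),
   ("Gen AI Experience Score", []), ("AI/ML Experience Score", []), ("Supporting Information", [])]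

-- line.split(":", 1)[1].strip(): hand port, exact whenever ':' ∈ cs — which every guard
-- of the branches using it (startswith "…:") guarantees.
def pvRestA (cs : List Char) : List Char := PySem.Chars.strip ((cs.dropWhile (· ≠ ':')).drop 1)

def pvStepA (d : PySem.Dict String (List Char)) (line : String) : PySem.Dict String (List Char) :=
  let cs := line.toList
  if PySem.Chars.startswith cs pvP0 then d.insert "Name" (pvRestA cs)
    else if PySem.Chars.startswith cs pvP1 then d.insert "Contact Details" (pvRestA cs)
    else if PySem.Chars.startswith cs pvP2 then d.insert "University" (pvRestA cs)
    else if PySem.Chars.startswith cs pvP3 then d.insert "Year of Study" (pvRestA cs)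
    else if PySem.Chars.startswith cs pvP4 then d.insert "Course" (pvRestA cs)
    else if PySem.Chars.startswith cs pvP5 then d.insert "Discipline" (pvRestA cs)
    else if PySem.Chars.startswith cs pvP6 then d.insert "CGPA/Percentage" (pvRestA cs)
    else if PySem.Chars.startswith cs pvP7 then d.insert "Key Skills" (pvRestA cs)
    else if PySem.Chars.startswith cs pvP8 then d.insert "Gen AI Experience Score" (pvRestA cs)
    else if PySem.Chars.startswith cs pvP9 then d.insert "AI/ML Experience Score" (pvRestA cs)
  else if PySem.Chars.startswith cs pvSupPrefix then
    d.insert "Supporting Information" (d.getD "Supporting Information" [] ++ pvRestA cs)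
  else if PySem.Chars.startswith cs ("-".toList) || !(PySem.Chars.strip cs).isEmpty then
    d.insert "Supporting Information" (d.getD "Supporting Information" [] ++ ' ' :: PySem.Chars.strip cs)
  else d

def parse_model_response (response : String) : List (String × String) :=
  (((PySem.Str.splitlines response).foldl pvStepA pvInitA).items).map
    (fun kv => (kv.1, String.ofList kv.2))

-- ===== PORT B =====
-- _FIELDS: (prefix, key) for the ten plainly-assigned fields.
def pvFields : List (List Char × String) := [
  (pvP0, "Name"),
  (pvP1, "Contact Details"),
  (pvP2, "University"),
  (pvP3, "Year of Study"),
  (pvP4, "Course"),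
  (pvP5, "Discipline"),
  (pvP6, "CGPA/Percentage"),
  (pvP7, "Key Skills"),
  (pvP8, "Gen AI Experience Score"),
  (pvP9, "AI/ML Experience Score")]

-- next((l[len(prefix):].strip() for l in reversed(lines) if l.startswith(prefix)), "")
def pvLastField (lines : List String) (p : List Char) : List Char :=
  match lines.reverse.find? (fun l => PySem.Chars.startswith l.toList p) with
  | some l => PySem.Chars.strip (l.toList.drop p.length)
  | none => []

-- the piece (if any) a line contributes to Supporting Information
def pvPiece? (line : String) : Option (List Char) :=
  let cs := line.toList
  if PySem.Chars.startswith cs pvSupPrefix then some (PySem.Chars.strip (cs.drop pvSupPrefix.length))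
  else if pvFields.any (fun pk => PySem.Chars.startswith cs pk.1) then none
  else
    let t := PySem.Chars.strip cs
    if t.isEmpty then none else some (' ' :: t)

def parse_model_response_alt (response : String) : List (String × String) :=
  let lines := PySem.Str.splitlines response
  (pvFields.map (fun pk => (pk.2, String.ofList (pvLastField lines pk.1)))) ++
  [("Supporting Information", String.ofList
      ((lines.foldl (fun acc l => match pvPiece? l with | some p => acc ++ [p] | none => acc)
        ([] : List (List Char))).flatten))]

-- ===== PRECONDITION & SPEC =====
def Spec_parse_model_response (response : String) (out : List (String × String)) : Prop := out = parse_model_response_alt response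
instance (response : String) (out : List (String × String)) : Decidable (Spec_parse_model_response response out) := by unfold Spec_parse_model_response; infer_instance

-- ===== CLAIM (what is proved, stated in full; the proofs are below) =====
def Claim_equal_parse_model_response : Prop := ∀ (response : String), Dom_parse_model_response response → Spec_parse_model_response response (parse_model_response response)

-- ===== LEMMAS AND PROOFS =====

-- abstract state of A's dict: its eleven values, in key order
def pvD (v0 v1 v2 v3 v4 v5 v6 v7 v8 v9 v10 : List Char) : PySem.Dict String (List Char) :=
  PySem.Dict.mk [("Name", v0), ("Contact Details", v1), ("University", v2), ("Year of Study", v3),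
    ("Course", v4), ("Discipline", v5), ("CGPA/Percentage", v6), ("Key Skills", v7),
    ("Gen AI Experience Score", v8), ("AI/ML Experience Score", v9), ("Supporting Information", v10)]

-- pvLastField with an explicit default (the running value of A's dict entry)
def pvLFd (lines : List String) (p : List Char) (v : List Char) : List Char :=
  match lines.reverse.find? (fun l => PySem.Chars.startswith l.toList p) with
  | some l => PySem.Chars.strip (l.toList.drop p.length)
  | none => v

def pvSup (lines : List String) : List Char := (lines.filterMap pvPiece?).flatten

def pvAll : List (List Char) := [pvP0, pvP1, pvP2, pvP3, pvP4, pvP5, pvP6, pvP7, pvP8, pvP9, pvSupPrefix]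

lemma pv_nopre : ∀ p ∈ pvAll, ∀ q ∈ pvAll, p ≠ q → ¬ p <+: q := by decide

lemma pv_excl {cs p q : List Char} (hp : p ∈ pvAll) (hq : q ∈ pvAll) (hne : p ≠ q)
    (h : PySem.Chars.startswith cs p = true) : PySem.Chars.startswith cs q = false := by
  cases hb : PySem.Chars.startswith cs q
  · rfl
  · exfalso
    have h1 : p <+: cs := (PySem.Chars.startswith_iff cs p).mp h
    have h2 : q <+: cs := (PySem.Chars.startswith_iff cs q).mp hb
    rcases List.prefix_or_prefix_of_prefix h1 h2 with hpq | hqp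
    · exact pv_nopre p hp q hq hne hpq
    · exact pv_nopre q hq p hp hne.symm hqp

lemma pv_dropWhile_colon (h t : List Char) (hh : ':' ∉ h) :
    (h ++ ':' :: t).dropWhile (· ≠ ':') = ':' :: t := by
  induction h with
  | nil => simp
  | cons a h ih =>
      have ha : a ≠ ':' := fun e => hh (e ▸ List.mem_cons_self)
      have hh' : ':' ∉ h := fun e => hh (List.mem_cons_of_mem _ e)
      simpa [List.dropWhile_cons, ha] using ih hh'

lemma pv_rest_gen (cs h : List Char) (hh : ':' ∉ h)
    (hsw : PySem.Chars.startswith cs (h ++ [':']) = true) :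
    pvRestA cs = PySem.Chars.strip (cs.drop (h ++ [':']).length) := by
  obtain ⟨t, rfl⟩ := (PySem.Chars.startswith_iff cs (h ++ [':'])).mp hsw
  have e1 : (h ++ [':']) ++ t = h ++ ':' :: t := by simp
  rw [pvRestA, e1, pv_dropWhile_colon h t hh, ← e1, List.drop_left]
  simp

lemma pv_dash_strip (cs : List Char) (h : PySem.Chars.startswith cs ("-".toList) = true) :
    (PySem.Chars.strip cs).isEmpty = false := by
  obtain ⟨t, rfl⟩ := (PySem.Chars.startswith_iff cs _).mp h
  simp only [PySem.Chars.strip, PySem.Chars.lstrip, PySem.Chars.rstrip]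
  rw [Bool.eq_false_iff]
  intro hemp
  rw [List.isEmpty_iff] at hemp
  simp only [show ("-".toList : List Char) = ['-'] from rfl] at hemp
  rw [List.reverse_eq_nil_iff, List.dropWhile_eq_nil_iff] at hemp
  have hd : List.dropWhile PySem.Chars.isspace (['-'] ++ t) = '-' :: t := by
    rw [show (['-'] ++ t : List Char) = '-' :: t from rfl, List.dropWhile_cons, if_neg (by decide)]
  have : PySem.Chars.isspace '-' = true := hemp '-' (by rw [hd]; simp)
  exact absurd this (by decide)

lemma pvLFd_cons (l : String) (rest : List String) (p v : List Char) :
    pvLFd (l :: rest) p v =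
    pvLFd rest p (if PySem.Chars.startswith l.toList p = true
                  then PySem.Chars.strip (l.toList.drop p.length) else v) := by
  unfold pvLFd
  rw [List.reverse_cons, List.find?_append]
  cases hf : rest.reverse.find? (fun l => PySem.Chars.startswith l.toList p)
  · cases hs : PySem.Chars.startswith l.toList p <;> simp [List.find?, hs]
  · simp

lemma pvSup_cons (l : String) (rest : List String) :
    pvSup (l :: rest) = (pvPiece? l).getD [] ++ pvSup rest := by
  cases h : pvPiece? l <;> simp [pvSup, h]

lemma pvLast_eq (lines : List String) (p : List Char) :
    pvLastField lines p = pvLFd lines p [] := by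
  unfold pvLastField pvLFd
  cases lines.reverse.find? (fun l => PySem.Chars.startswith l.toList p) <;> rfl

lemma pv_acc (lines : List String) (acc : List (List Char)) :
    lines.foldl (fun acc l => match pvPiece? l with | some p => acc ++ [p] | none => acc) acc
      = acc ++ lines.filterMap pvPiece? := by
  induction lines generalizing acc with
  | nil => simp
  | cons l rest ih =>
      cases h : pvPiece? l <;> simp [h, ih]

lemma pvD_ins0 (v0 v1 v2 v3 v4 v5 v6 v7 v8 v9 v10 x : List Char) :
    (pvD v0 v1 v2 v3 v4 v5 v6 v7 v8 v9 v10).insert "Name" x = pvD x v1 v2 v3 v4 v5 v6 v7 v8 v9 v10 := by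
  simp [pvD, PySem.Dict.insert]

lemma pvD_ins1 (v0 v1 v2 v3 v4 v5 v6 v7 v8 v9 v10 x : List Char) :
    (pvD v0 v1 v2 v3 v4 v5 v6 v7 v8 v9 v10).insert "Contact Details" x = pvD v0 x v2 v3 v4 v5 v6 v7 v8 v9 v10 := by
  simp [pvD, PySem.Dict.insert]

lemma pvD_ins2 (v0 v1 v2 v3 v4 v5 v6 v7 v8 v9 v10 x : List Char) :
    (pvD v0 v1 v2 v3 v4 v5 v6 v7 v8 v9 v10).insert "University" x = pvD v0 v1 x v3 v4 v5 v6 v7 v8 v9 v10 := by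
  simp [pvD, PySem.Dict.insert]

lemma pvD_ins3 (v0 v1 v2 v3 v4 v5 v6 v7 v8 v9 v10 x : List Char) :
    (pvD v0 v1 v2 v3 v4 v5 v6 v7 v8 v9 v10).insert "Year of Study" x = pvD v0 v1 v2 x v4 v5 v6 v7 v8 v9 v10 := by
  simp [pvD, PySem.Dict.insert]

lemma pvD_ins4 (v0 v1 v2 v3 v4 v5 v6 v7 v8 v9 v10 x : List Char) :
    (pvD v0 v1 v2 v3 v4 v5 v6 v7 v8 v9 v10).insert "Course" x = pvD v0 v1 v2 v3 x v5 v6 v7 v8 v9 v10 := by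
  simp [pvD, PySem.Dict.insert]

lemma pvD_ins5 (v0 v1 v2 v3 v4 v5 v6 v7 v8 v9 v10 x : List Char) :
    (pvD v0 v1 v2 v3 v4 v5 v6 v7 v8 v9 v10).insert "Discipline" x = pvD v0 v1 v2 v3 v4 x v6 v7 v8 v9 v10 := by
  simp [pvD, PySem.Dict.insert]

lemma pvD_ins6 (v0 v1 v2 v3 v4 v5 v6 v7 v8 v9 v10 x : List Char) :
    (pvD v0 v1 v2 v3 v4 v5 v6 v7 v8 v9 v10).insert "CGPA/Percentage" x = pvD v0 v1 v2 v3 v4 v5 x v7 v8 v9 v10 := by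
  simp [pvD, PySem.Dict.insert]

lemma pvD_ins7 (v0 v1 v2 v3 v4 v5 v6 v7 v8 v9 v10 x : List Char) :
    (pvD v0 v1 v2 v3 v4 v5 v6 v7 v8 v9 v10).insert "Key Skills" x = pvD v0 v1 v2 v3 v4 v5 v6 x v8 v9 v10 := by
  simp [pvD, PySem.Dict.insert]

lemma pvD_ins8 (v0 v1 v2 v3 v4 v5 v6 v7 v8 v9 v10 x : List Char) :
    (pvD v0 v1 v2 v3 v4 v5 v6 v7 v8 v9 v10).insert "Gen AI Experience Score" x = pvD v0 v1 v2 v3 v4 v5 v6 v7 x v9 v10 := by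
  simp [pvD, PySem.Dict.insert]

lemma pvD_ins9 (v0 v1 v2 v3 v4 v5 v6 v7 v8 v9 v10 x : List Char) :
    (pvD v0 v1 v2 v3 v4 v5 v6 v7 v8 v9 v10).insert "AI/ML Experience Score" x = pvD v0 v1 v2 v3 v4 v5 v6 v7 v8 x v10 := by
  simp [pvD, PySem.Dict.insert]

lemma pvD_ins10 (v0 v1 v2 v3 v4 v5 v6 v7 v8 v9 v10 x : List Char) :
    (pvD v0 v1 v2 v3 v4 v5 v6 v7 v8 v9 v10).insert "Supporting Information" x = pvD v0 v1 v2 v3 v4 v5 v6 v7 v8 v9 x := by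
  simp [pvD, PySem.Dict.insert]

lemma pvD_getD_sup (v0 v1 v2 v3 v4 v5 v6 v7 v8 v9 v10 : List Char) :
    (pvD v0 v1 v2 v3 v4 v5 v6 v7 v8 v9 v10).getD "Supporting Information" [] = v10 := by
  simp [pvD, PySem.Dict.getD, PySem.Dict.get?]

set_option maxHeartbeats 4000000 in
lemma pv_fold : ∀ (lines : List String) (v0 v1 v2 v3 v4 v5 v6 v7 v8 v9 v10 : List Char),
    lines.foldl pvStepA (pvD v0 v1 v2 v3 v4 v5 v6 v7 v8 v9 v10) =
    pvD (pvLFd lines pvP0 v0) (pvLFd lines pvP1 v1) (pvLFd lines pvP2 v2) (pvLFd lines pvP3 v3) (pvLFd lines pvP4 v4) (pvLFd lines pvP5 v5) (pvLFd lines pvP6 v6) (pvLFd lines pvP7 v7) (pvLFd lines pvP8 v8) (pvLFd lines pvP9 v9) (v10 ++ pvSup lines) := by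
  intro lines
  induction lines with
  | nil => intro v0 v1 v2 v3 v4 v5 v6 v7 v8 v9 v10; simp [pvLFd, pvSup]
  | cons l rest ih =>
      intro v0 v1 v2 v3 v4 v5 v6 v7 v8 v9 v10
      by_cases h0 : PySem.Chars.startswith l.toList pvP0 = true
      · -- branch 0 fires
        have e1 : PySem.Chars.startswith l.toList pvP1 = false := pv_excl (by decide) (by decide) (by decide) h0
        have e2 : PySem.Chars.startswith l.toList pvP2 = false := pv_excl (by decide) (by decide) (by decide) h0
        have e3 : PySem.Chars.startswith l.toList pvP3 = false := pv_excl (by decide) (by decide) (by decide) h0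
        have e4 : PySem.Chars.startswith l.toList pvP4 = false := pv_excl (by decide) (by decide) (by decide) h0
        have e5 : PySem.Chars.startswith l.toList pvP5 = false := pv_excl (by decide) (by decide) (by decide) h0
        have e6 : PySem.Chars.startswith l.toList pvP6 = false := pv_excl (by decide) (by decide) (by decide) h0
        have e7 : PySem.Chars.startswith l.toList pvP7 = false := pv_excl (by decide) (by decide) (by decide) h0
        have e8 : PySem.Chars.startswith l.toList pvP8 = false := pv_excl (by decide) (by decide) (by decide) h0
        have e9 : PySem.Chars.startswith l.toList pvP9 = false := pv_excl (by decide) (by decide) (by decide) h0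
        have e10 : PySem.Chars.startswith l.toList pvSupPrefix = false := pv_excl (by decide) (by decide) (by decide) h0
        have hpiece : pvPiece? l = none := by simp [pvPiece?, pvFields, e10, h0]
        have hrest := pv_rest_gen l.toList ("1. Name".toList) (by decide) (by rw [show ("1. Name".toList ++ [':'] : List Char) = pvP0 from by decide]; exact h0)
        rw [show ("1. Name".toList ++ [':'] : List Char) = pvP0 from by decide] at hrest
        simp only [List.foldl_cons]
        rw [show pvStepA (pvD v0 v1 v2 v3 v4 v5 v6 v7 v8 v9 v10) l = pvD (pvRestA l.toList) v1 v2 v3 v4 v5 v6 v7 v8 v9 v10 from by simp [pvStepA,  h0, pvD_ins0]]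
        rw [ih]
        simp only [pvLFd_cons, pvSup_cons]
        simp [h0, e1, e2, e3, e4, e5, e6, e7, e8, e9, hpiece, hrest]
      rw [Bool.not_eq_true] at h0
      by_cases h1 : PySem.Chars.startswith l.toList pvP1 = true
      · -- branch 1 fires
        have e0 : PySem.Chars.startswith l.toList pvP0 = false := pv_excl (by decide) (by decide) (by decide) h1
        have e2 : PySem.Chars.startswith l.toList pvP2 = false := pv_excl (by decide) (by decide) (by decide) h1
        have e3 : PySem.Chars.startswith l.toList pvP3 = false := pv_excl (by decide) (by decide) (by decide) h1
        have e4 : PySem.Chars.startswith l.toList pvP4 = false := pv_excl (by decide) (by decide) (by decide) h1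
        have e5 : PySem.Chars.startswith l.toList pvP5 = false := pv_excl (by decide) (by decide) (by decide) h1
        have e6 : PySem.Chars.startswith l.toList pvP6 = false := pv_excl (by decide) (by decide) (by decide) h1
        have e7 : PySem.Chars.startswith l.toList pvP7 = false := pv_excl (by decide) (by decide) (by decide) h1
        have e8 : PySem.Chars.startswith l.toList pvP8 = false := pv_excl (by decide) (by decide) (by decide) h1
        have e9 : PySem.Chars.startswith l.toList pvP9 = false := pv_excl (by decide) (by decide) (by decide) h1
        have e10 : PySem.Chars.startswith l.toList pvSupPrefix = false := pv_excl (by decide) (by decide) (by decide) h1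
        have hpiece : pvPiece? l = none := by simp [pvPiece?, pvFields, e10, h1]
        have hrest := pv_rest_gen l.toList ("2. Contact Details".toList) (by decide) (by rw [show ("2. Contact Details".toList ++ [':'] : List Char) = pvP1 from by decide]; exact h1)
        rw [show ("2. Contact Details".toList ++ [':'] : List Char) = pvP1 from by decide] at hrest
        simp only [List.foldl_cons]
        rw [show pvStepA (pvD v0 v1 v2 v3 v4 v5 v6 v7 v8 v9 v10) l = pvD v0 (pvRestA l.toList) v2 v3 v4 v5 v6 v7 v8 v9 v10 from by simp [pvStepA, h0, h1, pvD_ins1]]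
        rw [ih]
        simp only [pvLFd_cons, pvSup_cons]
        simp [h1, e0, e2, e3, e4, e5, e6, e7, e8, e9, hpiece, hrest]
      rw [Bool.not_eq_true] at h1
      by_cases h2 : PySem.Chars.startswith l.toList pvP2 = true
      · -- branch 2 fires
        have e0 : PySem.Chars.startswith l.toList pvP0 = false := pv_excl (by decide) (by decide) (by decide) h2
        have e1 : PySem.Chars.startswith l.toList pvP1 = false := pv_excl (by decide) (by decide) (by decide) h2
        have e3 : PySem.Chars.startswith l.toList pvP3 = false := pv_excl (by decide) (by decide) (by decide) h2
        have e4 : PySem.Chars.startswith l.toList pvP4 = false := pv_excl (by decide) (by decide) (by decide) h2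
        have e5 : PySem.Chars.startswith l.toList pvP5 = false := pv_excl (by decide) (by decide) (by decide) h2
        have e6 : PySem.Chars.startswith l.toList pvP6 = false := pv_excl (by decide) (by decide) (by decide) h2
        have e7 : PySem.Chars.startswith l.toList pvP7 = false := pv_excl (by decide) (by decide) (by decide) h2
        have e8 : PySem.Chars.startswith l.toList pvP8 = false := pv_excl (by decide) (by decide) (by decide) h2
        have e9 : PySem.Chars.startswith l.toList pvP9 = false := pv_excl (by decide) (by decide) (by decide) h2
        have e10 : PySem.Chars.startswith l.toList pvSupPrefix = false := pv_excl (by decide) (by decide) (by decide) h2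
        have hpiece : pvPiece? l = none := by simp [pvPiece?, pvFields, e10, h2]
        have hrest := pv_rest_gen l.toList ("3. University".toList) (by decide) (by rw [show ("3. University".toList ++ [':'] : List Char) = pvP2 from by decide]; exact h2)
        rw [show ("3. University".toList ++ [':'] : List Char) = pvP2 from by decide] at hrest
        simp only [List.foldl_cons]
        rw [show pvStepA (pvD v0 v1 v2 v3 v4 v5 v6 v7 v8 v9 v10) l = pvD v0 v1 (pvRestA l.toList) v3 v4 v5 v6 v7 v8 v9 v10 from by simp [pvStepA, h0, h1, h2, pvD_ins2]]
        rw [ih]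
        simp only [pvLFd_cons, pvSup_cons]
        simp [h2, e0, e1, e3, e4, e5, e6, e7, e8, e9, hpiece, hrest]
      rw [Bool.not_eq_true] at h2
      by_cases h3 : PySem.Chars.startswith l.toList pvP3 = true
      · -- branch 3 fires
        have e0 : PySem.Chars.startswith l.toList pvP0 = false := pv_excl (by decide) (by decide) (by decide) h3
        have e1 : PySem.Chars.startswith l.toList pvP1 = false := pv_excl (by decide) (by decide) (by decide) h3
        have e2 : PySem.Chars.startswith l.toList pvP2 = false := pv_excl (by decide) (by decide) (by decide) h3
        have e4 : PySem.Chars.startswith l.toList pvP4 = false := pv_excl (by decide) (by decide) (by decide) h3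
        have e5 : PySem.Chars.startswith l.toList pvP5 = false := pv_excl (by decide) (by decide) (by decide) h3
        have e6 : PySem.Chars.startswith l.toList pvP6 = false := pv_excl (by decide) (by decide) (by decide) h3
        have e7 : PySem.Chars.startswith l.toList pvP7 = false := pv_excl (by decide) (by decide) (by decide) h3
        have e8 : PySem.Chars.startswith l.toList pvP8 = false := pv_excl (by decide) (by decide) (by decide) h3
        have e9 : PySem.Chars.startswith l.toList pvP9 = false := pv_excl (by decide) (by decide) (by decide) h3
        have e10 : PySem.Chars.startswith l.toList pvSupPrefix = false := pv_excl (by decide) (by decide) (by decide) h3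
        have hpiece : pvPiece? l = none := by simp [pvPiece?, pvFields, e10, h3]
        have hrest := pv_rest_gen l.toList ("4. Year of Study".toList) (by decide) (by rw [show ("4. Year of Study".toList ++ [':'] : List Char) = pvP3 from by decide]; exact h3)
        rw [show ("4. Year of Study".toList ++ [':'] : List Char) = pvP3 from by decide] at hrest
        simp only [List.foldl_cons]
        rw [show pvStepA (pvD v0 v1 v2 v3 v4 v5 v6 v7 v8 v9 v10) l = pvD v0 v1 v2 (pvRestA l.toList) v4 v5 v6 v7 v8 v9 v10 from by simp [pvStepA, h0, h1, h2, h3, pvD_ins3]]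
        rw [ih]
        simp only [pvLFd_cons, pvSup_cons]
        simp [h3, e0, e1, e2, e4, e5, e6, e7, e8, e9, hpiece, hrest]
      rw [Bool.not_eq_true] at h3
      by_cases h4 : PySem.Chars.startswith l.toList pvP4 = true
      · -- branch 4 fires
        have e0 : PySem.Chars.startswith l.toList pvP0 = false := pv_excl (by decide) (by decide) (by decide) h4
        have e1 : PySem.Chars.startswith l.toList pvP1 = false := pv_excl (by decide) (by decide) (by decide) h4
        have e2 : PySem.Chars.startswith l.toList pvP2 = false := pv_excl (by decide) (by decide) (by decide) h4
        have e3 : PySem.Chars.startswith l.toList pvP3 = false := pv_excl (by decide) (by decide) (by decide) h4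
        have e5 : PySem.Chars.startswith l.toList pvP5 = false := pv_excl (by decide) (by decide) (by decide) h4
        have e6 : PySem.Chars.startswith l.toList pvP6 = false := pv_excl (by decide) (by decide) (by decide) h4
        have e7 : PySem.Chars.startswith l.toList pvP7 = false := pv_excl (by decide) (by decide) (by decide) h4
        have e8 : PySem.Chars.startswith l.toList pvP8 = false := pv_excl (by decide) (by decide) (by decide) h4
        have e9 : PySem.Chars.startswith l.toList pvP9 = false := pv_excl (by decide) (by decide) (by decide) h4
        have e10 : PySem.Chars.startswith l.toList pvSupPrefix = false := pv_excl (by decide) (by decide) (by decide) h4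
        have hpiece : pvPiece? l = none := by simp [pvPiece?, pvFields, e10, h4]
        have hrest := pv_rest_gen l.toList ("5. Course".toList) (by decide) (by rw [show ("5. Course".toList ++ [':'] : List Char) = pvP4 from by decide]; exact h4)
        rw [show ("5. Course".toList ++ [':'] : List Char) = pvP4 from by decide] at hrest
        simp only [List.foldl_cons]
        rw [show pvStepA (pvD v0 v1 v2 v3 v4 v5 v6 v7 v8 v9 v10) l = pvD v0 v1 v2 v3 (pvRestA l.toList) v5 v6 v7 v8 v9 v10 from by simp [pvStepA, h0, h1, h2, h3, h4, pvD_ins4]]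
        rw [ih]
        simp only [pvLFd_cons, pvSup_cons]
        simp [h4, e0, e1, e2, e3, e5, e6, e7, e8, e9, hpiece, hrest]
      rw [Bool.not_eq_true] at h4
      by_cases h5 : PySem.Chars.startswith l.toList pvP5 = true
      · -- branch 5 fires
        have e0 : PySem.Chars.startswith l.toList pvP0 = false := pv_excl (by decide) (by decide) (by decide) h5
        have e1 : PySem.Chars.startswith l.toList pvP1 = false := pv_excl (by decide) (by decide) (by decide) h5
        have e2 : PySem.Chars.startswith l.toList pvP2 = false := pv_excl (by decide) (by decide) (by decide) h5
        have e3 : PySem.Chars.startswith l.toList pvP3 = false := pv_excl (by decide) (by decide) (by decide) h5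
        have e4 : PySem.Chars.startswith l.toList pvP4 = false := pv_excl (by decide) (by decide) (by decide) h5
        have e6 : PySem.Chars.startswith l.toList pvP6 = false := pv_excl (by decide) (by decide) (by decide) h5
        have e7 : PySem.Chars.startswith l.toList pvP7 = false := pv_excl (by decide) (by decide) (by decide) h5
        have e8 : PySem.Chars.startswith l.toList pvP8 = false := pv_excl (by decide) (by decide) (by decide) h5
        have e9 : PySem.Chars.startswith l.toList pvP9 = false := pv_excl (by decide) (by decide) (by decide) h5
        have e10 : PySem.Chars.startswith l.toList pvSupPrefix = false := pv_excl (by decide) (by decide) (by decide) h5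
        have hpiece : pvPiece? l = none := by simp [pvPiece?, pvFields, e10, h5]
        have hrest := pv_rest_gen l.toList ("6. Discipline".toList) (by decide) (by rw [show ("6. Discipline".toList ++ [':'] : List Char) = pvP5 from by decide]; exact h5)
        rw [show ("6. Discipline".toList ++ [':'] : List Char) = pvP5 from by decide] at hrest
        simp only [List.foldl_cons]
        rw [show pvStepA (pvD v0 v1 v2 v3 v4 v5 v6 v7 v8 v9 v10) l = pvD v0 v1 v2 v3 v4 (pvRestA l.toList) v6 v7 v8 v9 v10 from by simp [pvStepA, h0, h1, h2, h3, h4, h5, pvD_ins5]]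
        rw [ih]
        simp only [pvLFd_cons, pvSup_cons]
        simp [h5, e0, e1, e2, e3, e4, e6, e7, e8, e9, hpiece, hrest]
      rw [Bool.not_eq_true] at h5
      by_cases h6 : PySem.Chars.startswith l.toList pvP6 = true
      · -- branch 6 fires
        have e0 : PySem.Chars.startswith l.toList pvP0 = false := pv_excl (by decide) (by decide) (by decide) h6
        have e1 : PySem.Chars.startswith l.toList pvP1 = false := pv_excl (by decide) (by decide) (by decide) h6
        have e2 : PySem.Chars.startswith l.toList pvP2 = false := pv_excl (by decide) (by decide) (by decide) h6
        have e3 : PySem.Chars.startswith l.toList pvP3 = false := pv_excl (by decide) (by decide) (by decide) h6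
        have e4 : PySem.Chars.startswith l.toList pvP4 = false := pv_excl (by decide) (by decide) (by decide) h6
        have e5 : PySem.Chars.startswith l.toList pvP5 = false := pv_excl (by decide) (by decide) (by decide) h6
        have e7 : PySem.Chars.startswith l.toList pvP7 = false := pv_excl (by decide) (by decide) (by decide) h6
        have e8 : PySem.Chars.startswith l.toList pvP8 = false := pv_excl (by decide) (by decide) (by decide) h6
        have e9 : PySem.Chars.startswith l.toList pvP9 = false := pv_excl (by decide) (by decide) (by decide) h6
        have e10 : PySem.Chars.startswith l.toList pvSupPrefix = false := pv_excl (by decide) (by decide) (by decide) h6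
        have hpiece : pvPiece? l = none := by simp [pvPiece?, pvFields, e10, h6]
        have hrest := pv_rest_gen l.toList ("7. CGPA/Percentage".toList) (by decide) (by rw [show ("7. CGPA/Percentage".toList ++ [':'] : List Char) = pvP6 from by decide]; exact h6)
        rw [show ("7. CGPA/Percentage".toList ++ [':'] : List Char) = pvP6 from by decide] at hrest
        simp only [List.foldl_cons]
        rw [show pvStepA (pvD v0 v1 v2 v3 v4 v5 v6 v7 v8 v9 v10) l = pvD v0 v1 v2 v3 v4 v5 (pvRestA l.toList) v7 v8 v9 v10 from by simp [pvStepA, h0, h1, h2, h3, h4, h5, h6, pvD_ins6]]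
        rw [ih]
        simp only [pvLFd_cons, pvSup_cons]
        simp [h6, e0, e1, e2, e3, e4, e5, e7, e8, e9, hpiece, hrest]
      rw [Bool.not_eq_true] at h6
      by_cases h7 : PySem.Chars.startswith l.toList pvP7 = true
      · -- branch 7 fires
        have e0 : PySem.Chars.startswith l.toList pvP0 = false := pv_excl (by decide) (by decide) (by decide) h7
        have e1 : PySem.Chars.startswith l.toList pvP1 = false := pv_excl (by decide) (by decide) (by decide) h7
        have e2 : PySem.Chars.startswith l.toList pvP2 = false := pv_excl (by decide) (by decide) (by decide) h7
        have e3 : PySem.Chars.startswith l.toList pvP3 = false := pv_excl (by decide) (by decide) (by decide) h7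
        have e4 : PySem.Chars.startswith l.toList pvP4 = false := pv_excl (by decide) (by decide) (by decide) h7
        have e5 : PySem.Chars.startswith l.toList pvP5 = false := pv_excl (by decide) (by decide) (by decide) h7
        have e6 : PySem.Chars.startswith l.toList pvP6 = false := pv_excl (by decide) (by decide) (by decide) h7
        have e8 : PySem.Chars.startswith l.toList pvP8 = false := pv_excl (by decide) (by decide) (by decide) h7
        have e9 : PySem.Chars.startswith l.toList pvP9 = false := pv_excl (by decide) (by decide) (by decide) h7
        have e10 : PySem.Chars.startswith l.toList pvSupPrefix = false := pv_excl (by decide) (by decide) (by decide) h7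
        have hpiece : pvPiece? l = none := by simp [pvPiece?, pvFields, e10, h7]
        have hrest := pv_rest_gen l.toList ("8. Key Skills".toList) (by decide) (by rw [show ("8. Key Skills".toList ++ [':'] : List Char) = pvP7 from by decide]; exact h7)
        rw [show ("8. Key Skills".toList ++ [':'] : List Char) = pvP7 from by decide] at hrest
        simp only [List.foldl_cons]
        rw [show pvStepA (pvD v0 v1 v2 v3 v4 v5 v6 v7 v8 v9 v10) l = pvD v0 v1 v2 v3 v4 v5 v6 (pvRestA l.toList) v8 v9 v10 from by simp [pvStepA, h0, h1, h2, h3, h4, h5, h6, h7, pvD_ins7]]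
        rw [ih]
        simp only [pvLFd_cons, pvSup_cons]
        simp [h7, e0, e1, e2, e3, e4, e5, e6, e8, e9, hpiece, hrest]
      rw [Bool.not_eq_true] at h7
      by_cases h8 : PySem.Chars.startswith l.toList pvP8 = true
      · -- branch 8 fires
        have e0 : PySem.Chars.startswith l.toList pvP0 = false := pv_excl (by decide) (by decide) (by decide) h8
        have e1 : PySem.Chars.startswith l.toList pvP1 = false := pv_excl (by decide) (by decide) (by decide) h8
        have e2 : PySem.Chars.startswith l.toList pvP2 = false := pv_excl (by decide) (by decide) (by decide) h8
        have e3 : PySem.Chars.startswith l.toList pvP3 = false := pv_excl (by decide) (by decide) (by decide) h8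
        have e4 : PySem.Chars.startswith l.toList pvP4 = false := pv_excl (by decide) (by decide) (by decide) h8
        have e5 : PySem.Chars.startswith l.toList pvP5 = false := pv_excl (by decide) (by decide) (by decide) h8
        have e6 : PySem.Chars.startswith l.toList pvP6 = false := pv_excl (by decide) (by decide) (by decide) h8
        have e7 : PySem.Chars.startswith l.toList pvP7 = false := pv_excl (by decide) (by decide) (by decide) h8
        have e9 : PySem.Chars.startswith l.toList pvP9 = false := pv_excl (by decide) (by decide) (by decide) h8
        have e10 : PySem.Chars.startswith l.toList pvSupPrefix = false := pv_excl (by decide) (by decide) (by decide) h8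
        have hpiece : pvPiece? l = none := by simp [pvPiece?, pvFields, e10, h8]
        have hrest := pv_rest_gen l.toList ("9. Gen AI Experience Score".toList) (by decide) (by rw [show ("9. Gen AI Experience Score".toList ++ [':'] : List Char) = pvP8 from by decide]; exact h8)
        rw [show ("9. Gen AI Experience Score".toList ++ [':'] : List Char) = pvP8 from by decide] at hrest
        simp only [List.foldl_cons]
        rw [show pvStepA (pvD v0 v1 v2 v3 v4 v5 v6 v7 v8 v9 v10) l = pvD v0 v1 v2 v3 v4 v5 v6 v7 (pvRestA l.toList) v9 v10 from by simp [pvStepA, h0, h1, h2, h3, h4, h5, h6, h7, h8, pvD_ins8]]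
        rw [ih]
        simp only [pvLFd_cons, pvSup_cons]
        simp [h8, e0, e1, e2, e3, e4, e5, e6, e7, e9, hpiece, hrest]
      rw [Bool.not_eq_true] at h8
      by_cases h9 : PySem.Chars.startswith l.toList pvP9 = true
      · -- branch 9 fires
        have e0 : PySem.Chars.startswith l.toList pvP0 = false := pv_excl (by decide) (by decide) (by decide) h9
        have e1 : PySem.Chars.startswith l.toList pvP1 = false := pv_excl (by decide) (by decide) (by decide) h9
        have e2 : PySem.Chars.startswith l.toList pvP2 = false := pv_excl (by decide) (by decide) (by decide) h9
        have e3 : PySem.Chars.startswith l.toList pvP3 = false := pv_excl (by decide) (by decide) (by decide) h9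
        have e4 : PySem.Chars.startswith l.toList pvP4 = false := pv_excl (by decide) (by decide) (by decide) h9
        have e5 : PySem.Chars.startswith l.toList pvP5 = false := pv_excl (by decide) (by decide) (by decide) h9
        have e6 : PySem.Chars.startswith l.toList pvP6 = false := pv_excl (by decide) (by decide) (by decide) h9
        have e7 : PySem.Chars.startswith l.toList pvP7 = false := pv_excl (by decide) (by decide) (by decide) h9
        have e8 : PySem.Chars.startswith l.toList pvP8 = false := pv_excl (by decide) (by decide) (by decide) h9
        have e10 : PySem.Chars.startswith l.toList pvSupPrefix = false := pv_excl (by decide) (by decide) (by decide) h9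
        have hpiece : pvPiece? l = none := by simp [pvPiece?, pvFields, e10, h9]
        have hrest := pv_rest_gen l.toList ("10. AI/ML Experience Score".toList) (by decide) (by rw [show ("10. AI/ML Experience Score".toList ++ [':'] : List Char) = pvP9 from by decide]; exact h9)
        rw [show ("10. AI/ML Experience Score".toList ++ [':'] : List Char) = pvP9 from by decide] at hrest
        simp only [List.foldl_cons]
        rw [show pvStepA (pvD v0 v1 v2 v3 v4 v5 v6 v7 v8 v9 v10) l = pvD v0 v1 v2 v3 v4 v5 v6 v7 v8 (pvRestA l.toList) v10 from by simp [pvStepA, h0, h1, h2, h3, h4, h5, h6, h7, h8, h9, pvD_ins9]]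
        rw [ih]
        simp only [pvLFd_cons, pvSup_cons]
        simp [h9, e0, e1, e2, e3, e4, e5, e6, e7, e8, hpiece, hrest]
      rw [Bool.not_eq_true] at h9
      by_cases h10 : PySem.Chars.startswith l.toList pvSupPrefix = true
      · -- the "11. Supporting Information:" branch fires
        have e0 : PySem.Chars.startswith l.toList pvP0 = false := pv_excl (by decide) (by decide) (by decide) h10
        have e1 : PySem.Chars.startswith l.toList pvP1 = false := pv_excl (by decide) (by decide) (by decide) h10
        have e2 : PySem.Chars.startswith l.toList pvP2 = false := pv_excl (by decide) (by decide) (by decide) h10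
        have e3 : PySem.Chars.startswith l.toList pvP3 = false := pv_excl (by decide) (by decide) (by decide) h10
        have e4 : PySem.Chars.startswith l.toList pvP4 = false := pv_excl (by decide) (by decide) (by decide) h10
        have e5 : PySem.Chars.startswith l.toList pvP5 = false := pv_excl (by decide) (by decide) (by decide) h10
        have e6 : PySem.Chars.startswith l.toList pvP6 = false := pv_excl (by decide) (by decide) (by decide) h10
        have e7 : PySem.Chars.startswith l.toList pvP7 = false := pv_excl (by decide) (by decide) (by decide) h10
        have e8 : PySem.Chars.startswith l.toList pvP8 = false := pv_excl (by decide) (by decide) (by decide) h10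
        have e9 : PySem.Chars.startswith l.toList pvP9 = false := pv_excl (by decide) (by decide) (by decide) h10
        have hpiece : pvPiece? l = some (PySem.Chars.strip (l.toList.drop pvSupPrefix.length)) := by simp [pvPiece?, h10]
        have hrest := pv_rest_gen l.toList ("11. Supporting Information".toList) (by decide) (by rw [show ("11. Supporting Information".toList ++ [':'] : List Char) = pvSupPrefix from by decide]; exact h10)
        rw [show ("11. Supporting Information".toList ++ [':'] : List Char) = pvSupPrefix from by decide] at hrest
        simp only [List.foldl_cons]
        rw [show pvStepA (pvD v0 v1 v2 v3 v4 v5 v6 v7 v8 v9 v10) l = pvD v0 v1 v2 v3 v4 v5 v6 v7 v8 v9 (v10 ++ pvRestA l.toList) from by simp [pvStepA, h0, h1, h2, h3, h4, h5, h6, h7, h8, h9, h10, pvD_getD_sup, pvD_ins10]]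
        rw [ih]
        simp only [pvLFd_cons, pvSup_cons]
        simp [hpiece, hrest, e0, e1, e2, e3, e4, e5, e6, e7, e8, e9]
      rw [Bool.not_eq_true] at h10
      by_cases hf : (PySem.Chars.startswith l.toList ("-".toList) || !(PySem.Chars.strip l.toList).isEmpty) = true
      · -- fallback: append " " + line.strip() to Supporting Information
        have hne : (PySem.Chars.strip l.toList).isEmpty = false := by
          cases hd : PySem.Chars.startswith l.toList ("-".toList)
          · have hd2 : PySem.Chars.startswith l.toList ['-'] = false := hd
            simp [hd2] at hf; simpa using hf
          · exact pv_dash_strip _ hd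
        have hpiece : pvPiece? l = some (' ' :: PySem.Chars.strip l.toList) := by
          simp [pvPiece?, pvFields, h0, h1, h2, h3, h4, h5, h6, h7, h8, h9, h10, hne]
        simp only [List.foldl_cons]
        rw [show pvStepA (pvD v0 v1 v2 v3 v4 v5 v6 v7 v8 v9 v10) l = pvD v0 v1 v2 v3 v4 v5 v6 v7 v8 v9 (v10 ++ ' ' :: PySem.Chars.strip l.toList) from by simp [pvStepA, h0, h1, h2, h3, h4, h5, h6, h7, h8, h9, h10, hne, pvD_getD_sup, pvD_ins10]]
        rw [ih]
        simp only [pvLFd_cons, pvSup_cons]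
        simp [hpiece, h0, h1, h2, h3, h4, h5, h6, h7, h8, h9]
      · -- blank line: nothing happens
        rw [Bool.not_eq_true, Bool.or_eq_false_iff] at hf
        obtain ⟨hd, hs⟩ := hf
        have hemp : (PySem.Chars.strip l.toList).isEmpty = true := by simpa using hs
        have hd' : PySem.Chars.startswith l.toList ['-'] = false := hd
        have hpiece : pvPiece? l = none := by
          simp [pvPiece?, pvFields, h0, h1, h2, h3, h4, h5, h6, h7, h8, h9, h10, hemp]
        simp only [List.foldl_cons]
        rw [show pvStepA (pvD v0 v1 v2 v3 v4 v5 v6 v7 v8 v9 v10) l = pvD v0 v1 v2 v3 v4 v5 v6 v7 v8 v9 v10 from by simp [pvStepA, h0, h1, h2, h3, h4, h5, h6, h7, h8, h9, h10, hd', hemp]]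
        rw [ih]
        simp only [pvLFd_cons, pvSup_cons]
        simp [hpiece, h0, h1, h2, h3, h4, h5, h6, h7, h8, h9]

lemma pv_init : pvInitA = pvD [] [] [] [] [] [] [] [] [] [] [] := by decide

-- ===== VERDICT (by name: the statement is the Claim_ definition above) =====
theorem parse_model_response_spec : Claim_equal_parse_model_response := by
  intro response _
  show parse_model_response response = parse_model_response_alt response
  unfold parse_model_response parse_model_response_alt
  rw [pv_init, pv_fold]
  simp [pvD, pvFields, pvLast_eq, pvSup, pv_acc]
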